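-- pv_equiv track=rewrite | github.com/murali-chillakuru/EnterpriseSecurityIQ-V1 | AIAgent/app/postureiq_reports/html_report.py | _remediation_roadmap
-- ===== SOURCE A (Python) =====
-- SEVERITY_COLORS = {
--     "critical": "#D13438",
--     "high": "#F7630C",
--     "medium": "#FFB900",
--     "low": "#107C10",
-- }
--
-- def _esc(s: str) -> str:
--     return (s or "").replace("&", "&amp;").replace("<", "&lt;").replace(">", "&gt;").replace('"', "&quot;")
--
-- def _remediation_roadmap(findings: list) -> str:
--     """Build priority-ordered remediation roadmap from non-compliant findings."""
--     nc_findings = [f for f in findings if f.get("Status") == "non_compliant"]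
--     if not nc_findings:
--         return '<p class="empty">No remediation actions needed — all controls are compliant.</p>'
--
--     sev_order = {"critical": 0, "high": 1, "medium": 2, "low": 3, "informational": 4}
--     nc_findings.sort(key=lambda f: sev_order.get(f.get("Severity", "medium"), 2))
--
--     # Group by severity
--     groups: dict[str, list] = {}
--     for f in nc_findings:
--         sev = f.get("Severity", "medium")
--         groups.setdefault(sev, []).append(f)
--
--     html_parts = []
--     priority = 1
--     for sev in ["critical", "high", "medium", "low"]:
--         items = groups.get(sev, [])
--         if not items:
--             continue
--         color = SEVERITY_COLORS.get(sev, "#A8A6A3")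
--         html_parts.append(f'<h3 style="color:{color}">Priority {priority}: {sev.upper()} ({len(items)} items)</h3>')
--         html_parts.append('<div class="roadmap-items">')
--         seen = set()
--         for f in items:
--             rec = f.get("Recommendation", "")
--             desc = f.get("Description", "")
--             key = rec or desc
--             if key in seen:
--                 continue
--             seen.add(key)
--             cid = _esc(f.get("ControlId", ""))
--             fw = _esc(f.get("Framework", ""))
--             html_parts.append(f"""
--             <div class="finding-card non-compliant">
--               <div class="finding-header">
--                 <code>{cid}</code>
--                 <span class="badge" style="background:{color}">{sev.upper()}</span>
--                 <span style="color:var(--text-muted);font-size:11px">{fw}</span>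
--               </div>
--               <p class="finding-desc">{_esc(desc)}</p>
--               {"<div class='remediation'><strong>Action:</strong> " + _esc(rec) + "</div>" if rec else ""}
--             </div>""")
--         html_parts.append('</div>')
--         priority += 1
--
--     return "\n".join(html_parts)
-- ===== SOURCE B (Python) =====
-- SEVERITY_COLORS = {
--     "critical": "#D13438",
--     "high": "#F7630C",
--     "medium": "#FFB900",
--     "low": "#107C10",
-- }
--
-- def _esc(s: str) -> str:
--     return (s or "").replace("&", "&amp;").replace("<", "&lt;").replace(">", "&gt;").replace('"', "&quot;")
--
-- def _group_html(sev: str, priority: int, items: list) -> list: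
--     color = SEVERITY_COLORS[sev]
--     parts = [f'<h3 style="color:{color}">Priority {priority}: {sev.upper()} ({len(items)} items)</h3>',
--              '<div class="roadmap-items">']
--     seen = set()
--     for f in items:
--         rec = f.get("Recommendation", "")
--         desc = f.get("Description", "")
--         key = rec or desc
--         if key in seen:
--             continue
--         seen.add(key)
--         cid = _esc(f.get("ControlId", ""))
--         fw = _esc(f.get("Framework", ""))
--         parts.append(f"""
--             <div class="finding-card non-compliant">
--               <div class="finding-header">
--                 <code>{cid}</code>
--                 <span class="badge" style="background:{color}">{sev.upper()}</span>
--                 <span style="color:var(--text-muted);font-size:11px">{fw}</span>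
--               </div>
--               <p class="finding-desc">{_esc(desc)}</p>
--               {"<div class='remediation'><strong>Action:</strong> " + _esc(rec) + "</div>" if rec else ""}
--             </div>""")
--     parts.append('</div>')
--     return parts
--
-- def _remediation_roadmap(findings: list) -> str:
--     nc_findings = [f for f in findings if f.get("Status") == "non_compliant"]
--     if not nc_findings:
--         return '<p class="empty">No remediation actions needed — all controls are compliant.</p>'
--     parts = []
--     priority = 1
--     for sev in ("critical", "high", "medium", "low"):
--         items = [f for f in nc_findings if f.get("Severity", "medium") == sev]
--         if not items:
--             continue
--         parts += _group_html(sev, priority, items)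
--         priority += 1
--     return "\n".join(parts)
-- ===== Notes on version B (the rewrite author's own statement) =====
-- stated objective: simpler
-- what changed: B removes A's severity sort and its setdefault-grouping dict entirely: it iterates the fixed severity list and selects each group with one inline filter over the non-compliant findings, assembling the groups recursively.
import Mathlib
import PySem

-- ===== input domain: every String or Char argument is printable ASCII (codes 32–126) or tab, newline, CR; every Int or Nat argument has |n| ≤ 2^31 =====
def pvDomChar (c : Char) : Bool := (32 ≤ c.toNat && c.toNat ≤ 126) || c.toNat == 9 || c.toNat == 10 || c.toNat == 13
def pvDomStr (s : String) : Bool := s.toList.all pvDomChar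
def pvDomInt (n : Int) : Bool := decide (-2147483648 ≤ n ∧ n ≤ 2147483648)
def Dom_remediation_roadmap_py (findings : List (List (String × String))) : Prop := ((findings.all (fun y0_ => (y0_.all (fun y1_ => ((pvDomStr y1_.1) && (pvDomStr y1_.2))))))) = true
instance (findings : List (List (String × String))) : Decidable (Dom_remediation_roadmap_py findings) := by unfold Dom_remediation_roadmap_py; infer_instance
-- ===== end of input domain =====

-- B drops A's redundant sort and its severity-grouping dict: it just filters the
-- non-compliant findings once per fixed severity, building the groups recursively (objective: simpler).

-- ===== shared helpers (identical Python code in both versions: _esc, the card f-string, the per-group dedup loop) =====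
def pvGet? (f : List (String × String)) (k : String) : Option String :=
  PySem.Dict.get? (PySem.Dict.mk f) k

def pvGetD (f : List (String × String)) (k d : String) : String :=
  PySem.Dict.getD (PySem.Dict.mk f) k d

def pvEsc (s : String) : String :=
  PySem.Str.replace (PySem.Str.replace (PySem.Str.replace (PySem.Str.replace s "&" "&amp;") "<" "&lt;") ">" "&gt;") "\"" "&quot;"

def pvColor (sev : String) : String :=
  PySem.Dict.getD (PySem.Dict.mk [("critical", "#D13438"), ("high", "#F7630C"), ("medium", "#FFB900"), ("low", "#107C10")]) sev "#A8A6A3"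

def pvCard (color sev : String) (f : List (String × String)) : String :=
  let rcm := pvGetD f "Recommendation" ""
  let desc := pvGetD f "Description" ""
  let cid := pvEsc (pvGetD f "ControlId" "")
  let fw := pvEsc (pvGetD f "Framework" "")
  "\n            <div class=\"finding-card non-compliant\">\n              <div class=\"finding-header\">\n                <code>"
    ++ cid
    ++ "</code>\n                <span class=\"badge\" style=\"background:" ++ color ++ "\">"
    ++ PySem.Str.upper sev
    ++ "</span>\n                <span style=\"color:var(--text-muted);font-size:11px\">" ++ fw
    ++ "</span>\n              </div>\n              <p class=\"finding-desc\">" ++ pvEsc desc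
    ++ "</p>\n              "
    ++ (if rcm ≠ "" then "<div class='remediation'><strong>Action:</strong> " ++ pvEsc rcm ++ "</div>" else "")
    ++ "\n            </div>"

-- the 'seen'-set dedup loop over one severity group (identical in A and B)
def pvEmitCards (color sev : String) : List (List (String × String)) → PySem.Set String → List String
  | [], _ => []
  | f :: rest, seen =>
    let rcm := pvGetD f "Recommendation" ""
    let desc := pvGetD f "Description" ""
    let key := if rcm ≠ "" then rcm else desc
    if PySem.Set.contains seen key then pvEmitCards color sev rest seen
    else pvCard color sev f :: pvEmitCards color sev rest (PySem.Set.add seen key)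

def pvHeader (color : String) (priority : Int) (sev : String) (n : Int) : String :=
  "<h3 style=\"color:" ++ color ++ "\">Priority " ++ PySem.Int.toStr priority ++ ": "
    ++ PySem.Str.upper sev ++ " (" ++ PySem.Int.toStr n ++ " items)</h3>"

def pvEmpty : String := "<p class=\"empty\">No remediation actions needed — all controls are compliant.</p>"

-- ===== PORT A =====
def pvSevOrder : PySem.Dict String Int :=
  PySem.Dict.mk [("critical", 0), ("high", 1), ("medium", 2), ("low", 3), ("informational", 4)]

def pvSevKey (f : List (String × String)) : Int :=
  PySem.Dict.getD pvSevOrder (pvGetD f "Severity" "medium") 2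

def remediation_roadmap_py (findings : List (List (String × String))) : String :=
  let nc := findings.filter (fun f => pvGet? f "Status" == some "non_compliant")
  if nc = [] then pvEmpty
  else
    let ncSorted := PySem.List.sorted nc pvSevKey
    let groups : PySem.Dict String (List (List (String × String))) :=
      ncSorted.foldl (fun d f => PySem.Dict.modify d (pvGetD f "Severity" "medium") [] (· ++ [f])) PySem.Dict.empty
    let st : List String × Int :=
      ["critical", "high", "medium", "low"].foldl (fun st sev =>
        let items := PySem.Dict.getD groups sev []
        if items = [] then st
        else
          let color := pvColor sev
          (st.1 ++ [pvHeader color st.2 sev items.length, "<div class=\"roadmap-items\">"]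
                ++ pvEmitCards color sev items PySem.Set.empty ++ ["</div>"],
           st.2 + 1)) ([], 1)
    PySem.Str.join "\n" st.1

-- ===== PORT B =====
-- one severity group's html parts (Python helper _group_html)
def pvGroupHtml (sev : String) (priority : Int) (items : List (List (String × String))) : List String :=
  let color := pvColor sev
  pvHeader color priority sev items.length :: "<div class=\"roadmap-items\">"
    :: (pvEmitCards color sev items PySem.Set.empty ++ ["</div>"])

def pvBuild (nc : List (List (String × String))) : List String → Int → List String
  | [], _ => []
  | sev :: rest, priority =>
    let items := nc.filter (fun f => pvGetD f "Severity" "medium" == sev)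
    if items = [] then pvBuild nc rest priority
    else pvGroupHtml sev priority items ++ pvBuild nc rest (priority + 1)

def remediation_roadmap_py_alt (findings : List (List (String × String))) : String :=
  let nc := findings.filter (fun f => pvGet? f "Status" == some "non_compliant")
  if nc = [] then pvEmpty
  else PySem.Str.join "\n" (pvBuild nc ["critical", "high", "medium", "low"] 1)

-- ===== PRECONDITION & SPEC =====
def Spec_remediation_roadmap_py (findings : List (List (String × String))) (out : String) : Prop := out = remediation_roadmap_py_alt findings
instance (findings : List (List (String × String))) (out : String) : Decidable (Spec_remediation_roadmap_py findings out) := by unfold Spec_remediation_roadmap_py; infer_instance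

-- ===== CLAIM (what is proved, stated in full; the proofs are below) =====
def Claim_equal_remediation_roadmap_py : Prop := ∀ (findings : List (List (String × String))), Dom_remediation_roadmap_py findings → Spec_remediation_roadmap_py findings (remediation_roadmap_py findings)

-- ===== LEMMAS AND PROOFS =====

-- A's per-severity loop step, named for the proofs (definitionally the foldl body of port A)
def pvStepA (groups : PySem.Dict String (List (List (String × String))))
    (st : List String × Int) (sev : String) : List String × Int :=
  let items := PySem.Dict.getD groups sev []
  if items = [] then st
  else
    let color := pvColor sev
    (st.1 ++ [pvHeader color st.2 sev items.length, "<div class=\"roadmap-items\">"]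
          ++ pvEmitCards color sev items PySem.Set.empty ++ ["</div>"],
     st.2 + 1)

-- grouping: the dict built by the setdefault/append loop holds, at key s, exactly the filter
theorem pv_group_filter (l : List (List (String × String))) (d : PySem.Dict String (List (List (String × String)))) (s : String) :
    (l.foldl (fun d f => PySem.Dict.modify d (pvGetD f "Severity" "medium") [] (· ++ [f])) d).getD s []
      = d.getD s [] ++ l.filter (fun f => pvGetD f "Severity" "medium" == s) := by
  induction l generalizing d with
  | nil => simp
  | cons f rest ih =>
    rw [List.foldl_cons, ih]
    by_cases h : pvGetD f "Severity" "medium" = s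
    · simp [PySem.Dict.modify, h]
    · simp [PySem.Dict.modify, PySem.Dict.getD_insert, h, Ne.symm h]

-- filter commutes with a stable insertion: elements selected by p all share one key value
theorem pv_filter_insertBy (k : List (String × String) → Int) (p : List (String × String) → Bool)
    (h : ∀ a b, p a = true → p b = true → k a = k b) (x : List (String × String)) :
    ∀ ys : List (List (String × String)), ys.Pairwise (fun a b => k a ≤ k b) →
      (PySem.List.insertBy (fun a b => decide (k a < k b)) x ys).filter p
        = ys.filter p ++ [x].filter p := by
  intro ys
  induction ys with
  | nil => simp [PySem.List.insertBy]
  | cons y ys ih =>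
    intro hp
    rw [List.pairwise_cons] at hp
    simp only [PySem.List.insertBy]
    by_cases hlt : k x < k y
    · rw [if_pos (by simp [hlt])]
      by_cases hpx : p x = true
      · have hnone : ∀ b ∈ y :: ys, ¬ p b = true := by
          intro b hb hpb
          have hbx : k b = k x := h b x hpb hpx
          rcases List.mem_cons.mp hb with hb | hb
          · subst hb; omega
          · have := hp.1 b hb; omega
        have h1 : (y :: ys).filter p = [] := List.filter_eq_nil_iff.2 hnone
        simp [hpx, h1]
      · have hpx' : p x = false := by revert hpx; cases p x <;> simp
        simp [List.filter_cons, hpx']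
    · rw [if_neg (by simp [hlt])]
      rw [List.filter_cons, List.filter_cons, ih hp.2]
      by_cases hpy : p y = true <;> simp [hpy]

-- filter commutes with A's stable sort when p picks out a single key value
theorem pv_filter_sorted (k : List (String × String) → Int) (p : List (String × String) → Bool)
    (h : ∀ a b, p a = true → p b = true → k a = k b) (l : List (List (String × String))) :
    (PySem.List.sorted l k).filter p = l.filter p := by
  induction l using List.reverseRecOn with
  | nil => simp [PySem.List.sorted_eq_foldl_insertBy]
  | append_singleton l x ih =>
    have hs : PySem.List.sorted (l ++ [x]) k
        = PySem.List.insertBy (fun a b => decide (k a < k b)) x (PySem.List.sorted l k) := by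
      rw [PySem.List.sorted_eq_foldl_insertBy, PySem.List.sorted_eq_foldl_insertBy, List.foldl_append]
      rfl
    rw [hs, pv_filter_insertBy k p h x _ (PySem.List.sorted_pairwise l k), ih, List.filter_append]

-- A's per-severity group equals B's per-severity filter
theorem pv_items_eq (nc : List (List (String × String))) (s : String) :
    (((PySem.List.sorted nc pvSevKey).foldl
        (fun d f => PySem.Dict.modify d (pvGetD f "Severity" "medium") [] (· ++ [f]))
        PySem.Dict.empty).getD s [])
      = nc.filter (fun f => pvGetD f "Severity" "medium" == s) := by
  rw [pv_group_filter]
  have h : ∀ a b, (pvGetD a "Severity" "medium" == s) = true →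
      (pvGetD b "Severity" "medium" == s) = true → pvSevKey a = pvSevKey b := by
    intro a b ha hb
    have ha' : pvGetD a "Severity" "medium" = s := by simpa using ha
    have hb' : pvGetD b "Severity" "medium" = s := by simpa using hb
    simp only [pvSevKey, ha', hb']
  rw [pv_filter_sorted pvSevKey _ h]
  rfl

-- the two output loops agree once the per-severity item lists agree
theorem pv_loop_eq (nc : List (List (String × String)))
    (groups : PySem.Dict String (List (List (String × String))))
    (hg : ∀ s, groups.getD s [] = nc.filter (fun f => pvGetD f "Severity" "medium" == s)) :
    ∀ (sevs : List String) (parts : List String) (priority : Int),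
      (sevs.foldl (pvStepA groups) (parts, priority)).1 = parts ++ pvBuild nc sevs priority := by
  intro sevs
  induction sevs with
  | nil => intro parts priority; simp [pvBuild]
  | cons sev rest ih =>
    intro parts priority
    rw [List.foldl_cons]
    by_cases hi : nc.filter (fun f => pvGetD f "Severity" "medium" == sev) = []
    · have hstep : pvStepA groups (parts, priority) sev = (parts, priority) := by
        simp [pvStepA, hg sev, hi]
      rw [hstep, ih]
      simp [pvBuild, hi]
    · have hstep : pvStepA groups (parts, priority) sev
        = (parts ++ pvGroupHtml sev priority (nc.filter (fun f => pvGetD f "Severity" "medium" == sev)),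
           priority + 1) := by
        simp [pvStepA, hg sev, hi, pvGroupHtml]
      rw [hstep, ih]
      simp [pvBuild, hi, List.append_assoc]

-- ===== VERDICT (by name: the statement is the Claim_ definition above) =====
theorem remediation_roadmap_py_spec : Claim_equal_remediation_roadmap_py := by
  intro findings _
  unfold Spec_remediation_roadmap_py remediation_roadmap_py remediation_roadmap_py_alt
  by_cases h : findings.filter (fun f => pvGet? f "Status" == some "non_compliant") = []
  · simp [h]
  · simp only [if_neg h]
    have h2 := pv_loop_eq (findings.filter (fun f => pvGet? f "Status" == some "non_compliant")) _
      (fun s => pv_items_eq _ s) ["critical", "high", "medium", "low"] [] 1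
    rw [List.nil_append] at h2
    exact congrArg (PySem.Str.join "\n") h2
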